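-- pv_equiv track=rewrite | github.com/gschizas/retrodev | video2cpc/video2cpc.py | convierte_pixels
-- ===== SOURCE A (Python) =====
-- def convierte_pixels(cadena, ppb):
-- 	"""
-- 	Convierte una cadena de bytes a un modo del CPC
-- 	"""
-- 	cadena_final = ""
-- 	for i in range(len(cadena) // ppb):
-- 		if ppb == 2:
-- 			byte_tmp0 = cadena[i * ppb]
-- 			byte_tmp1 = cadena[i * ppb + 1]
-- 			byte_tmp = chr(((ord(byte_tmp1) & 0x08) >> 3) | ((ord(byte_tmp1) & 0x04) << 2) | \
-- 						((ord(byte_tmp1) & 0x02) << 1) | ((ord(byte_tmp1) & 0x01) << 6) | \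
-- 						((ord(byte_tmp0) & 0x08) >> 2) | ((ord(byte_tmp0) & 0x04) << 3) | \
-- 						((ord(byte_tmp0) & 0x02) << 2) | ((ord(byte_tmp0) & 0x01) << 7))
-- 		elif ppb == 4:
-- 			byte_tmp0 = cadena[i * ppb]
-- 			byte_tmp1 = cadena[i * ppb + 1]
-- 			byte_tmp2 = cadena[i * ppb + 2]
-- 			byte_tmp3 = cadena[i * ppb + 3]
-- 			byte_tmp = chr(((ord(byte_tmp3) & 0x02) >> 1) | ((ord(byte_tmp3) & 0x01) << 4) | \
-- 						((ord(byte_tmp2) & 0x02)) | ((ord(byte_tmp2) & 0x01) << 5) | \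
-- 						((ord(byte_tmp1) & 0x02) << 1) | ((ord(byte_tmp1) & 0x01) << 6) | \
-- 						((ord(byte_tmp0) & 0x02) << 2) | ((ord(byte_tmp0) & 0x01) << 7))
-- 		elif ppb == 8:
-- 			byte_tmp0 = cadena[i * ppb]
-- 			byte_tmp1 = cadena[i * ppb + 1]
-- 			byte_tmp2 = cadena[i * ppb + 2]
-- 			byte_tmp3 = cadena[i * ppb + 3]
-- 			byte_tmp4 = cadena[i * ppb + 4]
-- 			byte_tmp5 = cadena[i * ppb + 5]
-- 			byte_tmp6 = cadena[i * ppb + 6]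
-- 			byte_tmp7 = cadena[i * ppb + 7]
-- 			byte_tmp = chr(((ord(byte_tmp7) & 0x01)) | ((ord(byte_tmp6) & 0x01) << 1) | \
-- 						((ord(byte_tmp5) & 0x01) << 2) | ((ord(byte_tmp4) & 0x01) << 3) | \
-- 						((ord(byte_tmp3) & 0x01) << 4) | ((ord(byte_tmp2) & 0x01) << 5) | \
-- 						((ord(byte_tmp1) & 0x01) << 6) | ((ord(byte_tmp0) & 0x01) << 7))
-- 		cadena_final += byte_tmp
-- 	return cadena_final
-- ===== SOURCE B (Python) =====
-- # Table-driven re-implementation: each mode's bit permutation is data, not unrolled code.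
-- _TABLES = {
--     2: [(1, 3, 0), (1, 2, 4), (1, 1, 2), (1, 0, 6),
--         (0, 3, 1), (0, 2, 5), (0, 1, 3), (0, 0, 7)],
--     4: [(3, 1, 0), (3, 0, 4), (2, 1, 1), (2, 0, 5),
--         (1, 1, 2), (1, 0, 6), (0, 1, 3), (0, 0, 7)],
--     8: [(7, 0, 0), (6, 0, 1), (5, 0, 2), (4, 0, 3),
--         (3, 0, 4), (2, 0, 5), (1, 0, 6), (0, 0, 7)],
-- }
--
--
-- def convierte_pixels(cadena, ppb):
--     """
--     Convierte una cadena de bytes a un modo del CPC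
--     """
--     table = _TABLES.get(ppb)
--     bloques = []
--     for i in range(len(cadena) // ppb):
--         acc = 0
--         for offset, src_bit, dst_bit in table:
--             if (ord(cadena[i * ppb + offset]) >> src_bit) & 1:
--                 acc |= 1 << dst_bit
--         bloques.append(chr(acc))
--     return ''.join(bloques)
-- ===== Notes on version B (the rewrite author's own statement) =====
-- stated objective: idiomatic
-- what changed: Replaces the three unrolled per-mode bit-shuffling expressions by a per-mode permutation table of (source offset, source bit, destination bit) triples and one generic test-bit/set-bit fold per output byte.
import Mathlib
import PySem

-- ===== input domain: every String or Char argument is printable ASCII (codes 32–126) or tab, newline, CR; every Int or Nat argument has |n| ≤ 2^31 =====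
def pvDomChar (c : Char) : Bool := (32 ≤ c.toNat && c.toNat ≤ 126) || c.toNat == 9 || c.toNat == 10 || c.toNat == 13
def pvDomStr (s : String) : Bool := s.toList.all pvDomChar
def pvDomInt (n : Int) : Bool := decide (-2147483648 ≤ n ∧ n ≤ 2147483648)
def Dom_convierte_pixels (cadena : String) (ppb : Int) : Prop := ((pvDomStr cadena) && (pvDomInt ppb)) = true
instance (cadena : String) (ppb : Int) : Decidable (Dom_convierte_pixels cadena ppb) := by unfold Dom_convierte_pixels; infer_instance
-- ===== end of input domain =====

-- B replaces A's three unrolled bit-shuffling expressions by a per-mode permutation table of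
-- (source offset, source bit, destination bit) triples folded over each block (objective: idiomatic).

-- ===== PORT A =====
-- ord(cadena[i]) in total form (default on the `none` = IndexError case); Pre_ keeps every used index in range.
def pvOrd (cadena : String) (i : Int) : Nat :=
  ((PySem.Str.pyGet? cadena i).getD ' ').toNat

def convierte_pixels (cadena : String) (ppb : Int) : String :=
  String.ofList <|
    (PySem.List.pyRange 0 (PySem.Int.floordiv (PySem.Str.len cadena) ppb) 1).foldl
      (fun cadena_final i =>
        if ppb = 2 then
          let b0 := pvOrd cadena (i * ppb)
          let b1 := pvOrd cadena (i * ppb + 1)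
          cadena_final ++ [Char.ofNat (((b1 &&& 0x08) >>> 3) ||| ((b1 &&& 0x04) <<< 2) |||
            ((b1 &&& 0x02) <<< 1) ||| ((b1 &&& 0x01) <<< 6) |||
            ((b0 &&& 0x08) >>> 2) ||| ((b0 &&& 0x04) <<< 3) |||
            ((b0 &&& 0x02) <<< 2) ||| ((b0 &&& 0x01) <<< 7))]
        else if ppb = 4 then
          let b0 := pvOrd cadena (i * ppb)
          let b1 := pvOrd cadena (i * ppb + 1)
          let b2 := pvOrd cadena (i * ppb + 2)
          let b3 := pvOrd cadena (i * ppb + 3)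
          cadena_final ++ [Char.ofNat (((b3 &&& 0x02) >>> 1) ||| ((b3 &&& 0x01) <<< 4) |||
            (b2 &&& 0x02) ||| ((b2 &&& 0x01) <<< 5) |||
            ((b1 &&& 0x02) <<< 1) ||| ((b1 &&& 0x01) <<< 6) |||
            ((b0 &&& 0x02) <<< 2) ||| ((b0 &&& 0x01) <<< 7))]
        else if ppb = 8 then
          let b0 := pvOrd cadena (i * ppb)
          let b1 := pvOrd cadena (i * ppb + 1)
          let b2 := pvOrd cadena (i * ppb + 2)
          let b3 := pvOrd cadena (i * ppb + 3)
          let b4 := pvOrd cadena (i * ppb + 4)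
          let b5 := pvOrd cadena (i * ppb + 5)
          let b6 := pvOrd cadena (i * ppb + 6)
          let b7 := pvOrd cadena (i * ppb + 7)
          cadena_final ++ [Char.ofNat ((b7 &&& 0x01) ||| ((b6 &&& 0x01) <<< 1) |||
            ((b5 &&& 0x01) <<< 2) ||| ((b4 &&& 0x01) <<< 3) |||
            ((b3 &&& 0x01) <<< 4) ||| ((b2 &&& 0x01) <<< 5) |||
            ((b1 &&& 0x01) <<< 6) ||| ((b0 &&& 0x01) <<< 7))]
        else cadena_final)  -- Python raises UnboundLocalError here; excluded by Pre_
      []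

-- ===== PORT B =====
def pvTable2 : List (Nat × Nat × Nat) :=
  [(1, 3, 0), (1, 2, 4), (1, 1, 2), (1, 0, 6), (0, 3, 1), (0, 2, 5), (0, 1, 3), (0, 0, 7)]
def pvTable4 : List (Nat × Nat × Nat) :=
  [(3, 1, 0), (3, 0, 4), (2, 1, 1), (2, 0, 5), (1, 1, 2), (1, 0, 6), (0, 1, 3), (0, 0, 7)]
def pvTable8 : List (Nat × Nat × Nat) :=
  [(7, 0, 0), (6, 0, 1), (5, 0, 2), (4, 0, 3), (3, 0, 4), (2, 0, 5), (1, 0, 6), (0, 0, 7)]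
def pvTables : PySem.Dict Int (List (Nat × Nat × Nat)) :=
  PySem.Dict.ofList [(2, pvTable2), (4, pvTable4), (8, pvTable8)]

-- _TABLES.get(ppb) (None, i.e. [], only outside Pre_), then the per-block fold of Source B.
def convierte_pixels_alt (cadena : String) (ppb : Int) : String :=
  let table := (PySem.Dict.get? pvTables ppb).getD []
  String.ofList <|
    (PySem.List.pyRange 0 (PySem.Int.floordiv (PySem.Str.len cadena) ppb) 1).foldl
      (fun bloques i =>
        bloques ++ [Char.ofNat
          (table.foldl
            (fun acc e =>
              if (pvOrd cadena (i * ppb + (e.1 : Int)) >>> e.2.1) &&& 1 ≠ 0 then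
                acc ||| (1 <<< e.2.2)
              else acc)
            0)])
      []

-- ===== PRECONDITION & SPEC =====
-- Pre_ excludes exactly the inputs on which A raises: ppb = 0 (ZeroDivisionError) and
-- ppb ∉ {2,4,8} with at least one full block (UnboundLocalError on byte_tmp).
def Pre_convierte_pixels (cadena : String) (ppb : Int) : Prop :=
  ppb = 2 ∨ ppb = 4 ∨ ppb = 8 ∨ ppb < 0 ∨ (0 < ppb ∧ PySem.Str.len cadena < ppb)
instance (cadena : String) (ppb : Int) : Decidable (Pre_convierte_pixels cadena ppb) := by
  unfold Pre_convierte_pixels; infer_instance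

def pvWitness_convierte_pixels : String × Int := ("AB", 2)

def Spec_convierte_pixels (cadena : String) (ppb : Int) (out : String) : Prop := out = convierte_pixels_alt cadena ppb
instance (cadena : String) (ppb : Int) (out : String) : Decidable (Spec_convierte_pixels cadena ppb out) := by unfold Spec_convierte_pixels; infer_instance

-- ===== CLAIM (what is proved, stated in full; the proofs are below) =====
def Claim_equal_convierte_pixels : Prop := ∀ (cadena : String) (ppb : Int), Dom_convierte_pixels cadena ppb → Pre_convierte_pixels cadena ppb → Spec_convierte_pixels cadena ppb (convierte_pixels cadena ppb)

-- ===== LEMMAS AND PROOFS =====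

-- bit extraction bridges
theorem pv_and8 (x : Nat) : x &&& 8 = (x.testBit 3).toNat * 8 := by
  simpa using Nat.and_two_pow x 3
theorem pv_and4 (x : Nat) : x &&& 4 = (x.testBit 2).toNat * 4 := by
  simpa using Nat.and_two_pow x 2
theorem pv_and2 (x : Nat) : x &&& 2 = (x.testBit 1).toNat * 2 := by
  simpa using Nat.and_two_pow x 1
theorem pv_and1 (x : Nat) : x &&& 1 = (x.testBit 0).toNat := by
  simpa using Nat.and_two_pow x 0

set_option maxHeartbeats 1000000 in
theorem pv_pack2 (f : Nat → Nat) :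
    ((f 1 &&& 8) >>> 3) ||| ((f 1 &&& 4) <<< 2) ||| ((f 1 &&& 2) <<< 1) ||| ((f 1 &&& 1) <<< 6) |||
      ((f 0 &&& 8) >>> 2) ||| ((f 0 &&& 4) <<< 3) ||| ((f 0 &&& 2) <<< 2) ||| ((f 0 &&& 1) <<< 7) =
    pvTable2.foldl
      (fun acc e => if (f e.1 >>> e.2.1) &&& 1 ≠ 0 then acc ||| (1 <<< e.2.2) else acc) 0 := by
  simp only [pvTable2, List.foldl_cons, List.foldl_nil, Nat.testBit_shiftRight, Nat.add_zero, pv_and8, pv_and4, pv_and2, pv_and1]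
  cases (f 1).testBit 3 <;> cases (f 1).testBit 2 <;> cases (f 1).testBit 1 <;>
    cases (f 1).testBit 0 <;> cases (f 0).testBit 3 <;> cases (f 0).testBit 2 <;>
    cases (f 0).testBit 1 <;> cases (f 0).testBit 0 <;> decide

set_option maxHeartbeats 1000000 in
theorem pv_pack4 (f : Nat → Nat) :
    ((f 3 &&& 2) >>> 1) ||| ((f 3 &&& 1) <<< 4) ||| (f 2 &&& 2) ||| ((f 2 &&& 1) <<< 5) |||
      ((f 1 &&& 2) <<< 1) ||| ((f 1 &&& 1) <<< 6) ||| ((f 0 &&& 2) <<< 2) ||| ((f 0 &&& 1) <<< 7) =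
    pvTable4.foldl
      (fun acc e => if (f e.1 >>> e.2.1) &&& 1 ≠ 0 then acc ||| (1 <<< e.2.2) else acc) 0 := by
  simp only [pvTable4, List.foldl_cons, List.foldl_nil, Nat.testBit_shiftRight, Nat.add_zero, pv_and2, pv_and1]
  cases (f 3).testBit 1 <;> cases (f 3).testBit 0 <;> cases (f 2).testBit 1 <;>
    cases (f 2).testBit 0 <;> cases (f 1).testBit 1 <;> cases (f 1).testBit 0 <;>
    cases (f 0).testBit 1 <;> cases (f 0).testBit 0 <;> decide

set_option maxHeartbeats 1000000 in
theorem pv_pack8 (f : Nat → Nat) :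
    (f 7 &&& 1) ||| ((f 6 &&& 1) <<< 1) ||| ((f 5 &&& 1) <<< 2) ||| ((f 4 &&& 1) <<< 3) |||
      ((f 3 &&& 1) <<< 4) ||| ((f 2 &&& 1) <<< 5) ||| ((f 1 &&& 1) <<< 6) ||| ((f 0 &&& 1) <<< 7) =
    pvTable8.foldl
      (fun acc e => if (f e.1 >>> e.2.1) &&& 1 ≠ 0 then acc ||| (1 <<< e.2.2) else acc) 0 := by
  simp only [pvTable8, List.foldl_cons, List.foldl_nil, Nat.testBit_shiftRight, Nat.add_zero, pv_and1]
  cases (f 7).testBit 0 <;> cases (f 6).testBit 0 <;> cases (f 5).testBit 0 <;>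
    cases (f 4).testBit 0 <;> cases (f 3).testBit 0 <;> cases (f 2).testBit 0 <;>
    cases (f 1).testBit 0 <;> cases (f 0).testBit 0 <;> decide

theorem pv_len_nonneg (cadena : String) : 0 ≤ PySem.Str.len cadena := by
  simp [PySem.Str.len_eq]

-- fewer than one full block: both programs return ""
theorem pv_empty (cadena : String) (ppb : Int)
    (h : PySem.Int.floordiv (PySem.Str.len cadena) ppb ≤ 0) :
    convierte_pixels cadena ppb = convierte_pixels_alt cadena ppb := by
  unfold convierte_pixels convierte_pixels_alt
  rw [PySem.List.pyRange_one_eq_nil h]; rfl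

theorem pv_floordiv_nonpos_of_neg (a b : Int) (ha : 0 ≤ a) (hb : b < 0) :
    PySem.Int.floordiv a b ≤ 0 := by
  have hd := PySem.Int.floordiv_mul_add_mod a b
  have hm := PySem.Int.mod_neg_bounds (a := a) hb
  by_contra hq
  rw [not_le] at hq
  nlinarith [hm.2]

theorem pv_floordiv_eq_zero (a b : Int) (ha : 0 ≤ a) (hb : 0 < b) (hab : a < b) :
    PySem.Int.floordiv a b ≤ 0 := by
  rw [PySem.Int.floordiv_eq_ediv_of_pos hb, Int.ediv_eq_zero_of_lt ha hab]

theorem pv_mode2 (cadena : String) : convierte_pixels cadena 2 = convierte_pixels_alt cadena 2 := by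
  unfold convierte_pixels convierte_pixels_alt
  apply congrArg
  have htab : (PySem.Dict.get? pvTables 2).getD [] = pvTable2 := rfl
  simp only [htab, Int.reduceEq, reduceIte]
  rw [PySem.List.foldl_append_singleton_eq_map, PySem.List.foldl_append_singleton_eq_map]
  simp only [List.nil_append]
  apply List.map_congr_left
  intro i _
  apply congrArg
  simpa using pv_pack2 (fun off => pvOrd cadena (i * 2 + (off : Int)))

theorem pv_mode4 (cadena : String) : convierte_pixels cadena 4 = convierte_pixels_alt cadena 4 := by
  unfold convierte_pixels convierte_pixels_alt
  apply congrArg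
  have htab : (PySem.Dict.get? pvTables 4).getD [] = pvTable4 := rfl
  simp only [htab, Int.reduceEq, reduceIte]
  rw [PySem.List.foldl_append_singleton_eq_map, PySem.List.foldl_append_singleton_eq_map]
  simp only [List.nil_append]
  apply List.map_congr_left
  intro i _
  apply congrArg
  simpa using pv_pack4 (fun off => pvOrd cadena (i * 4 + (off : Int)))

theorem pv_mode8 (cadena : String) : convierte_pixels cadena 8 = convierte_pixels_alt cadena 8 := by
  unfold convierte_pixels convierte_pixels_alt
  apply congrArg
  have htab : (PySem.Dict.get? pvTables 8).getD [] = pvTable8 := rfl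
  simp only [htab, Int.reduceEq, reduceIte]
  rw [PySem.List.foldl_append_singleton_eq_map, PySem.List.foldl_append_singleton_eq_map]
  simp only [List.nil_append]
  apply List.map_congr_left
  intro i _
  apply congrArg
  simpa using pv_pack8 (fun off => pvOrd cadena (i * 8 + (off : Int)))

-- ===== VERDICT (by name: the statement is the Claim_ definition above) =====
theorem convierte_pixels_spec : Claim_equal_convierte_pixels := by
  intro cadena ppb _ hpre
  unfold Spec_convierte_pixels
  rcases hpre with h | h | h | h | ⟨h1, h2⟩
  · subst h; exact pv_mode2 cadena
  · subst h; exact pv_mode4 cadena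
  · subst h; exact pv_mode8 cadena
  · exact pv_empty cadena ppb (pv_floordiv_nonpos_of_neg _ _ (pv_len_nonneg cadena) h)
  · exact pv_empty cadena ppb (pv_floordiv_eq_zero _ _ (pv_len_nonneg cadena) h1 h2)
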